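-- pv_equiv track=rewrite | github.com/alpa-projects/alpa | playground/pipeline/test_generate_schedule.py | generate_gpipe_schedule
-- ===== SOURCE A (Python) =====
-- def generate_gpipe_schedule(m, n):
--     num_clock = m + n - 1
--     schedules = []
--     for k in range(num_clock):
--         scheds = [None] * n
--         for d in range(max(1 + k - m, 0), min(1 + k, n)):
--             scheds[d] = (k - d, d)
--         schedules.append(scheds)
--
--     def reverse(scheds):
--         reversed = []
--         for task in scheds:
--             if not task:
--                 reversed.append(None)
--             else:
--                 reversed.append((m - 1 - task[0], 2 * n - 1 - task[1]))
--         return reversed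
--
--     # backward schedules
--     for k in range(num_clock):
--         mapped_scheds = schedules[num_clock - k - 1]
--         schedules.append(reverse(mapped_scheds))
--     return schedules
-- ===== SOURCE B (Python) =====
-- def generate_gpipe_schedule(m, n):
--     num_clock = m + n - 1
--     schedules = [[None] * n for _ in range(max(0, 2 * num_clock))]
--     w = 2 * n - 1
--     for i in range(m):
--         fb = 2 * num_clock - 1 - i
--         mi = m - 1 - i
--         for d in range(n):
--             schedules[i + d][d] = (i, d)
--             schedules[fb - d][d] = (mi, w - d)
--     return schedules
-- ===== Notes on version B (the rewrite author's own statement) =====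
-- stated objective: alternative
-- what changed: B preallocates the full 2*(m+n-1) x n matrix and scatters each task (i,d) directly into its forward clock slot i+d and mirrored backward slot in one pass over tasks, instead of A's per-clock gather with range arithmetic plus a separate reverse() pass over stored forward rows.
import Mathlib
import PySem

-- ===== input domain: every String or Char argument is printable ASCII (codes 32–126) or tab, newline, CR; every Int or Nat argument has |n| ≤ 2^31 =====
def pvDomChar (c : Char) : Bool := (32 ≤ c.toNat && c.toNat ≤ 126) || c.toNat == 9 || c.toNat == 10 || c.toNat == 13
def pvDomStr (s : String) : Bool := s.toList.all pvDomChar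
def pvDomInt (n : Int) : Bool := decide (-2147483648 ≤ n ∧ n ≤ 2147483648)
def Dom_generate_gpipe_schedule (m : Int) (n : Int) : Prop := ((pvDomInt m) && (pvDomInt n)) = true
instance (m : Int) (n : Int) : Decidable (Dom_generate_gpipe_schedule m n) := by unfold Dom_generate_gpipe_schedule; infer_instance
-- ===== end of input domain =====

-- B scatters each task into its clock slot in one pass instead of A's per-clock gather + reverse pass (alternative decomposition, same value).

-- ===== PORT A =====
-- the inner 'for d in range(...): scheds[d] = (k-d, d)' loop body of A (indices d are ≥ 0, so .toNat is exact here)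
def gFwdRow (m n k : Int) : List (Option (Int × Int)) :=
  (PySem.List.pyRange (max (1 + k - m) 0) (min (1 + k) n) 1).foldl
    (fun acc d => acc.set d.toNat (some (k - d, d)))
    (List.replicate n.toNat (none : Option (Int × Int)))

-- A's local helper 'reverse'
def gReverseRow (m n : Int) (scheds : List (Option (Int × Int))) : List (Option (Int × Int)) :=
  scheds.foldl (fun acc task =>
    match task with
    | none => acc ++ [none]
    | some t => acc ++ [some (m - 1 - t.1, 2 * n - 1 - t.2)]) []

def generate_gpipe_schedule (m : Int) (n : Int) : List (List (Option (Int × Int))) :=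
  let num_clock := m + n - 1
  let forward := (PySem.List.pyRange 0 num_clock 1).foldl
    (fun schedules k => schedules ++ [gFwdRow m n k]) []
  -- the read index num_clock-k-1 is always in range, so the [] default of pyGetD is never used
  (PySem.List.pyRange 0 num_clock 1).foldl
    (fun schedules k =>
      schedules ++ [gReverseRow m n (PySem.List.pyGetD schedules (num_clock - k - 1) [])])
    forward

-- ===== PORT B =====
-- 'g[r][c] = v'; exact for the nonnegative in-range indices B uses
def gSetCell (g : List (List (Option (Int × Int)))) (r c : Int) (v : Option (Int × Int)) :
    List (List (Option (Int × Int))) :=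
  g.set r.toNat ((g.getD r.toNat []).set c.toNat v)

def generate_gpipe_schedule_alt (m : Int) (n : Int) : List (List (Option (Int × Int))) :=
  let num_clock := m + n - 1
  let init := List.replicate (max 0 (2 * num_clock)).toNat
    (List.replicate n.toNat (none : Option (Int × Int)))
  let w := 2 * n - 1
  (PySem.List.pyRange 0 m 1).foldl (fun g i =>
    let fb := 2 * num_clock - 1 - i
    let mi := m - 1 - i
    (PySem.List.pyRange 0 n 1).foldl (fun g d =>
      gSetCell (gSetCell g (i + d) d (some (i, d))) (fb - d) d (some (mi, w - d))) g) init

-- ===== PRECONDITION & SPEC =====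
def Spec_generate_gpipe_schedule (m : Int) (n : Int) (out : List (List (Option (Int × Int)))) : Prop := out = generate_gpipe_schedule_alt m n
instance (m : Int) (n : Int) (out : List (List (Option (Int × Int)))) : Decidable (Spec_generate_gpipe_schedule m n out) := by unfold Spec_generate_gpipe_schedule; infer_instance

-- ===== CLAIM (what is proved, stated in full; the proofs are below) =====
def Claim_equal_generate_gpipe_schedule : Prop := ∀ (m : Int) (n : Int), Dom_generate_gpipe_schedule m n → Spec_generate_gpipe_schedule m n (generate_gpipe_schedule m n)

-- ===== LEMMAS AND PROOFS =====

-- the common element-level specification both programs compute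
def gCell (m n r c : Int) : Option (Int × Int) :=
  if r < m + n - 1 then
    (if 0 ≤ r - c ∧ r - c < m then some (r - c, c) else none)
  else
    (if 0 ≤ (2 * (m + n - 1) - 1 - r) - c ∧ (2 * (m + n - 1) - 1 - r) - c < m then
      some (m - 1 - ((2 * (m + n - 1) - 1 - r) - c), 2 * n - 1 - c) else none)

def gMat (m n : Int) : List (List (Option (Int × Int))) :=
  (List.range (max 0 (2 * (m + n - 1))).toNat).map fun (r : Nat) =>
    (List.range n.toNat).map fun (c : Nat) => gCell m n (r : Int) (c : Int)

-- forward cell value of clock row k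
def gCellF (m k c : Int) : Option (Int × Int) :=
  if 0 ≤ k - c ∧ k - c < m then some (k - c, c) else none

-- A's 'reverse' maps one task
def gRev1 (m n : Int) (task : Option (Int × Int)) : Option (Int × Int) :=
  match task with
  | none => none
  | some t => some (m - 1 - t.1, 2 * n - 1 - t.2)

theorem foldl_set_length {a : Type} (ds : List Int) (f : Int → a) (lst : List a) :
    (ds.foldl (fun acc d => acc.set d.toNat (f d)) lst).length = lst.length := by
  induction ds generalizing lst with
  | nil => rfl
  | cons d ds ih => simp [List.foldl_cons, ih]

theorem foldl_set_getElem? {a : Type} (ds : List Int) (f : Int → a)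
    (hds : ∀ d ∈ ds, 0 ≤ d) (lst : List a) (j : Nat) (hj : j < lst.length) :
    (ds.foldl (fun acc d => acc.set d.toNat (f d)) lst)[j]? =
      if (j : Int) ∈ ds then some (f (j : Int)) else lst[j]? := by
  induction ds generalizing lst with
  | nil => simp
  | cons d ds ih =>
    have hd : 0 ≤ d := hds d (by simp)
    rw [List.foldl_cons, ih (fun x hx => hds x (by simp [hx])) _ (by simpa using hj)]
    by_cases hmem : (j : Int) ∈ ds
    · simp [hmem]
    · by_cases hjd : (j : Int) = d
      · have hdj : d.toNat = j := by omega
        simp [hmem, hjd, List.getElem?_set, hdj, hj]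
      · have hdj : d.toNat ≠ j := by omega
        simp [hmem, hjd, List.getElem?_set, hdj]

theorem gFwdRow_eq (m n k : Int) (hk : 0 ≤ k) :
    gFwdRow m n k = (List.range n.toNat).map (fun (c : Nat) => gCellF m k (c : Int)) := by
  apply List.ext_getElem?
  intro j
  by_cases hj : j < n.toNat
  · rw [gFwdRow,
      foldl_set_getElem? _ _
        (fun d hd => by
          have := PySem.List.mem_pyRange_one.mp hd
          omega)
        _ j (by simpa using hj)]
    have hrhs : ((List.range n.toNat).map (fun (c : Nat) => gCellF m k (c : Int)))[j]? =
        some (gCellF m k (j : Int)) := by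
      rw [List.getElem?_map, List.getElem?_range hj, Option.map_some]
    rw [hrhs]
    have hmem : ((j : Int) ∈ PySem.List.pyRange (max (1 + k - m) 0) (min (1 + k) n)) ↔
        (0 ≤ k - (j : Int) ∧ k - (j : Int) < m) := by
      rw [PySem.List.mem_pyRange_one]
      omega
    by_cases hcond : 0 ≤ k - (j : Int) ∧ k - (j : Int) < m
    · rw [if_pos (hmem.mpr hcond), gCellF, if_pos hcond]
    · rw [if_neg (fun h => hcond (hmem.mp h)), gCellF, if_neg hcond,
        List.getElem?_replicate, if_pos hj]
  · have h1 : (gFwdRow m n k).length ≤ j := by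
      rw [gFwdRow, foldl_set_length]; simpa using Nat.le_of_not_lt hj
    have h2 : ((List.range n.toNat).map (fun (c : Nat) => gCellF m k (c : Int))).length ≤ j := by
      simpa using Nat.le_of_not_lt hj
    rw [List.getElem?_eq_none h1, List.getElem?_eq_none h2]

theorem gReverseRow_eq (m n : Int) (xs : List (Option (Int × Int))) :
    gReverseRow m n xs = xs.map (gRev1 m n) := by
  have hfun : (fun (acc : List (Option (Int × Int))) task =>
      match task with
      | none => acc ++ [none]
      | some t => acc ++ [some (m - 1 - t.1, 2 * n - 1 - t.2)]) =
      (fun acc task => acc ++ [gRev1 m n task]) := by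
    funext acc task
    cases task <;> rfl
  rw [gReverseRow, hfun, PySem.List.foldl_append_singleton_eq_map]
  simp

theorem foldl_read_append (F : List (List (Option (Int × Int))))
    (g : List (Option (Int × Int)) → List (Option (Int × Int))) (ks : List Int) (idx : Int → Int)
    (h : ∀ k ∈ ks, 0 ≤ idx k ∧ (idx k).toNat < F.length) :
    ∀ acc : List (List (Option (Int × Int))), F <+: acc →
      ks.foldl (fun s k => s ++ [g (PySem.List.pyGetD s (idx k) [])]) acc =
      acc ++ ks.map (fun k => g (PySem.List.pyGetD F (idx k) [])) := by
  induction ks with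
  | nil => intro acc _; simp
  | cons k ks ih =>
    intro acc hpre
    have h1 := h k (by simp)
    have hlen : (idx k).toNat < acc.length := lt_of_lt_of_le h1.2 hpre.length_le
    have hread : PySem.List.pyGetD acc (idx k) [] = PySem.List.pyGetD F (idx k) [] := by
      rw [PySem.List.pyGetD_of_nonneg _ _ h1.1, PySem.List.pyGetD_of_nonneg _ _ h1.1,
        List.getD_eq_getElem?_getD, List.getD_eq_getElem?_getD,
        List.getElem?_eq_getElem h1.2, List.getElem?_eq_getElem hlen,
        hpre.getElem h1.2]
      rfl
    rw [List.foldl_cons, hread,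
      ih (fun x hx => h x (by simp [hx])) _ (hpre.trans (List.prefix_append acc _))]
    simp

theorem A_eq_gMat (m n : Int) : generate_gpipe_schedule m n = gMat m n := by
  simp only [generate_gpipe_schedule, gMat]
  by_cases hnc : m + n - 1 ≤ 0
  · rw [PySem.List.pyRange_one_eq_nil hnc]
    have : (max 0 (2 * (m + n - 1))).toNat = 0 := by omega
    simp [this]
  · push_neg at hnc
    have hnc0 : 0 ≤ m + n - 1 := le_of_lt hnc
    have hF : (PySem.List.pyRange 0 (m + n - 1)).foldl
        (fun schedules k => schedules ++ [gFwdRow m n k]) [] =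
        (PySem.List.pyRange 0 (m + n - 1)).map (gFwdRow m n) := by
      simpa using PySem.List.foldl_append_singleton_eq_map (gFwdRow m n)
        (PySem.List.pyRange 0 (m + n - 1)) []
    simp only [hF]
    have hidx : ∀ k ∈ PySem.List.pyRange 0 (m + n - 1),
        0 ≤ (fun k => m + n - 1 - k - 1) k ∧
        ((fun k => m + n - 1 - k - 1) k).toNat <
          ((PySem.List.pyRange 0 (m + n - 1)).map (gFwdRow m n)).length := by
      intro k hk
      have hk' := PySem.List.mem_pyRange_one.mp hk
      have hL : ((PySem.List.pyRange 0 (m + n - 1)).map (gFwdRow m n)).length =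
          (m + n - 1 - 0).toNat := by
        rw [List.length_map, PySem.List.length_pyRange_one]
      refine ⟨?_, ?_⟩
      · show 0 ≤ m + n - 1 - k - 1
        omega
      · rw [hL]
        show (m + n - 1 - k - 1).toNat < (m + n - 1 - 0).toNat
        omega
    rw [foldl_read_append ((PySem.List.pyRange 0 (m + n - 1)).map (gFwdRow m n))
        (gReverseRow m n) _ (fun k => m + n - 1 - k - 1) hidx _ (List.prefix_refl _)]
    have hget : ∀ k ∈ PySem.List.pyRange 0 (m + n - 1),
        gReverseRow m n (PySem.List.pyGetD
            ((PySem.List.pyRange 0 (m + n - 1)).map (gFwdRow m n)) (m + n - 1 - k - 1) []) =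
        gReverseRow m n (gFwdRow m n (m + n - 1 - k - 1)) := by
      intro k hk
      have hk' := PySem.List.mem_pyRange_one.mp hk
      rw [PySem.List.pyGetD_map_pyRange_of_nonneg _ _ _ _ (by omega) (by omega)]
    rw [List.map_congr_left hget]
    -- split the spec rows into the forward and backward halves
    have hsplit : (max 0 (2 * (m + n - 1))).toNat = (m + n - 1).toNat + (m + n - 1).toNat := by
      omega
    have hpr : PySem.List.pyRange 0 (m + n - 1) =
        (List.range (m + n - 1).toNat).map (fun (k : Nat) => (k : Int)) := by
      have h := PySem.List.pyRange_zero_natCast (m + n - 1).toNat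
      rwa [Int.toNat_of_nonneg hnc0] at h
    rw [hsplit, List.range_add, List.map_append, hpr,
      List.map_map, List.map_map, List.map_map]
    congr 1
    · apply List.map_congr_left
      intro r hr
      have hr' : r < (m + n - 1).toNat := List.mem_range.mp hr
      rw [Function.comp_apply, gFwdRow_eq m n _ (by omega)]
      apply List.map_congr_left
      intro c hc
      have hc' : c < n.toNat := List.mem_range.mp hc
      rw [gCell, if_pos (show ((r : Nat) : Int) < m + n - 1 by omega)]
      rfl
    · apply List.map_congr_left
      intro k hk
      have hk' : k < (m + n - 1).toNat := List.mem_range.mp hk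
      rw [Function.comp_apply, Function.comp_apply,
        gReverseRow_eq, gFwdRow_eq m n _ (by omega), List.map_map]
      apply List.map_congr_left
      intro c hc
      have hc' : c < n.toNat := List.mem_range.mp hc
      have hcast : ((m + n - 1).toNat + k : Nat) = ((m + n - 1).toNat : Int) + (k : Int) := by
        push_cast; ring
      rw [Function.comp_apply, gCellF, gCell, hcast]
      have hcond : ¬ (((m + n - 1).toNat : Int) + (k : Int) < m + n - 1) := by omega
      rw [if_neg hcond]
      have heq : 2 * (m + n - 1) - 1 - (((m + n - 1).toNat : Int) + (k : Int)) =
          m + n - 1 - (k : Int) - 1 := by omega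
      rw [heq]
      by_cases hc2 : 0 ≤ m + n - 1 - (k : Int) - 1 - (c : Int) ∧
          m + n - 1 - (k : Int) - 1 - (c : Int) < m
      · rw [if_pos hc2, if_pos hc2]; rfl
      · rw [if_neg hc2, if_neg hc2]; rfl

-- the value B writes into any cell it touches, as a function of the cell position
def gVal (m n r c : Int) : Option (Int × Int) :=
  if r < m + n - 1 then some (r - c, c)
  else some (m - 1 - ((2 * (m + n - 1) - 1 - r) - c), 2 * n - 1 - c)

theorem gSetCell_length (g : List (List (Option (Int × Int)))) (r c : Int)
    (v : Option (Int × Int)) : (gSetCell g r c v).length = g.length := by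
  simp [gSetCell]

theorem gSetCell_row_length (g : List (List (Option (Int × Int)))) (r c : Int)
    (v : Option (Int × Int)) (j : Nat) :
    (((gSetCell g r c v)[j]?).getD []).length = ((g[j]?).getD []).length := by
  unfold gSetCell
  rw [List.getElem?_set]
  by_cases h : r.toNat = j
  · subst h
    by_cases hlen : r.toNat < g.length
    · simp [hlen, List.getD_eq_getElem?_getD, List.getElem?_eq_getElem hlen]
    · simp [hlen, List.getElem?_eq_none (Nat.le_of_not_lt hlen)]
  · simp [h]

theorem cell_gSetCell (g : List (List (Option (Int × Int)))) (a b : Int)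
    (v : Option (Int × Int)) (ha : 0 ≤ a) (hb : 0 ≤ b) (r c : Nat)
    (hr : r < g.length) (hc : c < ((g[r]?).getD []).length) :
    (((gSetCell g a b v)[r]?).getD []).getD c none =
      if a = (r : Int) ∧ b = (c : Int) then v else ((g[r]?).getD []).getD c none := by
  unfold gSetCell
  rw [List.getElem?_set]
  by_cases har : a = (r : Int)
  · have h1 : a.toNat = r := by omega
    have hrow : g.getD a.toNat [] = (g[r]?).getD [] := by
      rw [List.getD_eq_getElem?_getD, h1]
    rw [if_pos h1, if_pos (h1 ▸ hr), Option.getD_some, hrow]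
    by_cases hbc : b = (c : Int)
    · have h2 : b.toNat = c := by omega
      rw [if_pos ⟨har, hbc⟩, List.getD_eq_getElem?_getD, List.getElem?_set,
        if_pos h2, if_pos (h2 ▸ hc), Option.getD_some]
    · have h2 : b.toNat ≠ c := by omega
      rw [if_neg (fun h => hbc h.2), List.getD_eq_getElem?_getD, List.getElem?_set,
        if_neg h2, ← List.getD_eq_getElem?_getD]
  · have h1 : a.toNat ≠ r := by omega
    rw [if_neg h1, if_neg (fun h => har h.1)]

theorem foldl_gSetCell_length (ts : List (Int × Int × Option (Int × Int))) :
    ∀ g : List (List (Option (Int × Int))),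
      (ts.foldl (fun g t => gSetCell g t.1 t.2.1 t.2.2) g).length = g.length := by
  induction ts with
  | nil => intro g; rfl
  | cons t ts ih => intro g; rw [List.foldl_cons, ih, gSetCell_length]

theorem foldl_gSetCell_row_length (ts : List (Int × Int × Option (Int × Int))) :
    ∀ (g : List (List (Option (Int × Int)))) (j : Nat),
      (((ts.foldl (fun g t => gSetCell g t.1 t.2.1 t.2.2) g)[j]?).getD []).length =
        ((g[j]?).getD []).length := by
  induction ts with
  | nil => intro g j; rfl
  | cons t ts ih => intro g j; rw [List.foldl_cons, ih, gSetCell_row_length]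

theorem foldl_gSetCell_cell (val : Int → Int → Option (Int × Int)) :
    ∀ (ts : List (Int × Int × Option (Int × Int))),
      (∀ t ∈ ts, t.2.2 = val t.1 t.2.1) →
      (∀ t ∈ ts, 0 ≤ t.1 ∧ 0 ≤ t.2.1) →
      ∀ (g : List (List (Option (Int × Int)))) (r c : Nat),
        r < g.length → c < ((g[r]?).getD []).length →
        (((ts.foldl (fun g t => gSetCell g t.1 t.2.1 t.2.2) g)[r]?).getD []).getD c none =
          if ∃ t ∈ ts, t.1 = (r : Int) ∧ t.2.1 = (c : Int) then val (r : Int) (c : Int)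
          else ((g[r]?).getD []).getD c none := by
  intro ts
  induction ts with
  | nil => intro _ _ g r c _ _; simp
  | cons t ts ih =>
    intro hval hpos g r c hr hc
    have hp := hpos t (by simp)
    have hr' : r < (gSetCell g t.1 t.2.1 t.2.2).length := by
      rw [gSetCell_length]; exact hr
    have hc' : c < (((gSetCell g t.1 t.2.1 t.2.2)[r]?).getD []).length := by
      rw [gSetCell_row_length]; exact hc
    rw [List.foldl_cons,
      ih (fun x hx => hval x (by simp [hx])) (fun x hx => hpos x (by simp [hx])) _ r c hr' hc']
    by_cases hts : ∃ x ∈ ts, x.1 = (r : Int) ∧ x.2.1 = (c : Int)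
    · obtain ⟨x, hx, hxx⟩ := hts
      rw [if_pos ⟨x, hx, hxx⟩, if_pos ⟨x, by simp [hx], hxx⟩]
    · rw [if_neg hts, cell_gSetCell g t.1 t.2.1 t.2.2 hp.1 hp.2 r c hr hc]
      by_cases hth : t.1 = (r : Int) ∧ t.2.1 = (c : Int)
      · rw [if_pos hth, if_pos ⟨t, by simp, hth⟩, hval t (by simp), hth.1, hth.2]
      · rw [if_neg hth, if_neg ?_]
        rintro ⟨x, hx, hxx⟩
        rcases List.mem_cons.mp hx with h | h
        · exact hth (h ▸ hxx)
        · exact hts ⟨x, h, hxx⟩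

theorem inner_eq_instr (m n nc i : Int) :
    ∀ (ys : List Int) (g : List (List (Option (Int × Int)))),
      ys.foldl (fun g d =>
        gSetCell (gSetCell g (i + d) d (some (i, d)))
          (2 * nc - 1 - i - d) d (some (m - 1 - i, 2 * n - 1 - d))) g =
      (ys.flatMap fun d =>
        [((i + d, d, some (i, d)) : Int × Int × Option (Int × Int)),
         (2 * nc - 1 - i - d, d, some (m - 1 - i, 2 * n - 1 - d))]).foldl
        (fun g t => gSetCell g t.1 t.2.1 t.2.2) g := by
  intro ys
  induction ys with
  | nil => intro g; rfl
  | cons y ys ih =>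
    intro g
    rw [List.foldl_cons, List.flatMap_cons, List.foldl_append, ih]
    rfl

theorem outer_eq_instr (m n nc : Int) :
    ∀ (xs ys : List Int) (g : List (List (Option (Int × Int)))),
      xs.foldl (fun g i => ys.foldl (fun g d =>
        gSetCell (gSetCell g (i + d) d (some (i, d)))
          (2 * nc - 1 - i - d) d (some (m - 1 - i, 2 * n - 1 - d))) g) g =
      (xs.flatMap fun i => ys.flatMap fun d =>
        [((i + d, d, some (i, d)) : Int × Int × Option (Int × Int)),
         (2 * nc - 1 - i - d, d, some (m - 1 - i, 2 * n - 1 - d))]).foldl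
        (fun g t => gSetCell g t.1 t.2.1 t.2.2) g := by
  intro xs
  induction xs with
  | nil => intro ys g; rfl
  | cons x xs ih =>
    intro ys g
    rw [List.foldl_cons, List.flatMap_cons, List.foldl_append, ih, inner_eq_instr]

theorem B_eq_gMat (m n : Int) : generate_gpipe_schedule_alt m n = gMat m n := by
  simp only [generate_gpipe_schedule_alt, gMat]
  rw [outer_eq_instr m n (m + n - 1)]
  set ts := ((PySem.List.pyRange 0 m).flatMap fun i => (PySem.List.pyRange 0 n).flatMap fun d =>
    [((i + d, d, some (i, d)) : Int × Int × Option (Int × Int)),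
     (2 * (m + n - 1) - 1 - i - d, d, some (m - 1 - i, 2 * n - 1 - d))]) with hts
  have hmem : ∀ t : Int × Int × Option (Int × Int), t ∈ ts ↔
      ∃ i d : Int, (0 ≤ i ∧ i < m) ∧ (0 ≤ d ∧ d < n) ∧
        (t = (i + d, d, some (i, d)) ∨
         t = (2 * (m + n - 1) - 1 - i - d, d, some (m - 1 - i, 2 * n - 1 - d))) := by
    intro t
    simp only [hts, List.mem_flatMap, PySem.List.mem_pyRange_one, List.mem_cons,
      List.mem_singleton, List.not_mem_nil, or_false]
    constructor
    · rintro ⟨i, hi, d, hd, h⟩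
      exact ⟨i, d, hi, hd, h⟩
    · rintro ⟨i, d, hi, hd, h⟩
      exact ⟨i, hi, d, hd, h⟩
  have hval : ∀ t ∈ ts, t.2.2 = gVal m n t.1 t.2.1 := by
    intro t ht
    obtain ⟨i, d, hi, hd, h | h⟩ := (hmem t).mp ht
    · subst h
      show some (i, d) = gVal m n (i + d) d
      rw [gVal, if_pos (by omega)]
      have h1 : i + d - d = i := by omega
      rw [h1]
    · subst h
      show some (m - 1 - i, 2 * n - 1 - d) = gVal m n (2 * (m + n - 1) - 1 - i - d) d
      rw [gVal, if_neg (by omega)]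
      have h1 : 2 * (m + n - 1) - 1 - (2 * (m + n - 1) - 1 - i - d) - d = i := by omega
      rw [h1]
  have hpos : ∀ t ∈ ts, 0 ≤ t.1 ∧ 0 ≤ t.2.1 := by
    intro t ht
    obtain ⟨i, d, hi, hd, h | h⟩ := (hmem t).mp ht <;> subst h <;> constructor <;> simp <;> omega
  set K := (max 0 (2 * (m + n - 1))).toNat with hK
  have hinitlen : (List.replicate K (List.replicate n.toNat (none : Option (Int × Int)))).length
      = K := by simp
  apply List.ext_getElem
  · rw [foldl_gSetCell_length, hinitlen, List.length_map, List.length_range]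
  · intro r h1 h2
    have hrK : r < K := by
      rw [foldl_gSetCell_length, hinitlen] at h1; exact h1
    have hrowlen : ∀ j : Nat,
        (((ts.foldl (fun g t => gSetCell g t.1 t.2.1 t.2.2)
            (List.replicate K (List.replicate n.toNat none)))[j]?).getD []).length =
          (((List.replicate K (List.replicate n.toNat
            (none : Option (Int × Int))))[j]?).getD []).length :=
      fun j => foldl_gSetCell_row_length ts _ j
    have hinitrow : ((List.replicate K (List.replicate n.toNat
        (none : Option (Int × Int))))[r]?).getD [] = List.replicate n.toNat none := by
      rw [List.getElem?_replicate, if_pos hrK, Option.getD_some]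
    have hrlen : (((ts.foldl (fun g t => gSetCell g t.1 t.2.1 t.2.2)
        (List.replicate K (List.replicate n.toNat none)))[r]?).getD []).length = n.toNat := by
      rw [hrowlen, hinitrow, List.length_replicate]
    rw [List.getElem_map, List.getElem_range]
    apply List.ext_getElem
    · have hBr : (ts.foldl (fun g t => gSetCell g t.1 t.2.1 t.2.2)
          (List.replicate K (List.replicate n.toNat none)))[r]'h1 =
          ((ts.foldl (fun g t => gSetCell g t.1 t.2.1 t.2.2)
            (List.replicate K (List.replicate n.toNat none)))[r]?).getD [] := by
        rw [List.getElem?_eq_getElem h1, Option.getD_some]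
      rw [hBr, hrlen, List.length_map, List.length_range]
    · intro c hc1 hc2
      have hBr : (ts.foldl (fun g t => gSetCell g t.1 t.2.1 t.2.2)
          (List.replicate K (List.replicate n.toNat none)))[r]'h1 =
          ((ts.foldl (fun g t => gSetCell g t.1 t.2.1 t.2.2)
            (List.replicate K (List.replicate n.toNat none)))[r]?).getD [] := by
        rw [List.getElem?_eq_getElem h1, Option.getD_some]
      have hcN : c < n.toNat := by
        rw [hBr, hrlen] at hc1; exact hc1
      have hcell : ((ts.foldl (fun g t => gSetCell g t.1 t.2.1 t.2.2)
          (List.replicate K (List.replicate n.toNat none)))[r]'h1)[c]'hc1 =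
          (((ts.foldl (fun g t => gSetCell g t.1 t.2.1 t.2.2)
            (List.replicate K (List.replicate n.toNat none)))[r]?).getD []).getD c none := by
        rw [List.getElem?_eq_getElem h1, Option.getD_some, List.getD_eq_getElem?_getD,
          List.getElem?_eq_getElem hc1, Option.getD_some]
      rw [hcell,
        foldl_gSetCell_cell (gVal m n) ts hval hpos _ r c (by rw [hinitlen]; exact hrK)
          (by rw [hinitrow, List.length_replicate]; exact hcN)]
      have hgoalr : ∀ hcr, ((List.range n.toNat).map
          (fun (c : Nat) => gCell m n (r : Int) (c : Int)))[c]'hcr =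
          gCell m n (r : Int) (c : Int) := by
        intro hcr
        rw [List.getElem_map, List.getElem_range]
      rw [hgoalr]
      have hR2 : (r : Int) < 2 * (m + n - 1) := by omega
      have hC : (c : Int) < n := by omega
      by_cases hfwd : (r : Int) < m + n - 1
      · by_cases hfit : 0 ≤ (r : Int) - (c : Int) ∧ (r : Int) - (c : Int) < m
        · have hex : ∃ t ∈ ts, t.1 = (r : Int) ∧ t.2.1 = (c : Int) := by
            refine ⟨((r : Int), (c : Int), some ((r : Int) - (c : Int), (c : Int))), ?_, rfl, rfl⟩
            refine (hmem _).mpr ⟨(r : Int) - (c : Int), (c : Int), ⟨by omega, by omega⟩,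
              ⟨by omega, hC⟩, Or.inl ?_⟩
            have h3 : (r : Int) - (c : Int) + (c : Int) = (r : Int) := by omega
            rw [h3]
          rw [if_pos hex, gVal, if_pos hfwd, gCell, if_pos hfwd, if_pos hfit]
        · have hnex : ¬ ∃ t ∈ ts, t.1 = (r : Int) ∧ t.2.1 = (c : Int) := by
            rintro ⟨t, ht, h1, h2⟩
            obtain ⟨i, d, hi, hd, h | h⟩ := (hmem t).mp ht <;> subst h <;>
              simp at h1 h2 <;> omega
          rw [if_neg hnex, gCell, if_pos hfwd, if_neg hfit,
            hinitrow, List.getD_eq_getElem?_getD, List.getElem?_replicate]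
          split <;> rfl
      · by_cases hfit : 0 ≤ (2 * (m + n - 1) - 1 - (r : Int)) - (c : Int) ∧
            (2 * (m + n - 1) - 1 - (r : Int)) - (c : Int) < m
        · have hex : ∃ t ∈ ts, t.1 = (r : Int) ∧ t.2.1 = (c : Int) := by
            refine ⟨((r : Int), (c : Int),
              some (m - 1 - ((2 * (m + n - 1) - 1 - (r : Int)) - (c : Int)),
                2 * n - 1 - (c : Int))), ?_, rfl, rfl⟩
            refine (hmem _).mpr ⟨(2 * (m + n - 1) - 1 - (r : Int)) - (c : Int), (c : Int),
              ⟨by omega, by omega⟩, ⟨by omega, hC⟩, Or.inr ?_⟩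
            have h3 : 2 * (m + n - 1) - 1 -
                (2 * (m + n - 1) - 1 - (r : Int) - (c : Int)) - (c : Int) = (r : Int) := by omega
            rw [h3]
          rw [if_pos hex, gVal, if_neg hfwd, gCell, if_neg hfwd, if_pos hfit]
        · have hnex : ¬ ∃ t ∈ ts, t.1 = (r : Int) ∧ t.2.1 = (c : Int) := by
            rintro ⟨t, ht, h1, h2⟩
            obtain ⟨i, d, hi, hd, h | h⟩ := (hmem t).mp ht <;> subst h <;>
              simp at h1 h2 <;> omega
          rw [if_neg hnex, gCell, if_neg hfwd, if_neg hfit,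
            hinitrow, List.getD_eq_getElem?_getD, List.getElem?_replicate]
          split <;> rfl


-- ===== VERDICT (by name: the statement is the Claim_ definition above) =====
theorem generate_gpipe_schedule_spec : Claim_equal_generate_gpipe_schedule := by
  intro m n _
  unfold Spec_generate_gpipe_schedule
  rw [A_eq_gMat, B_eq_gMat]
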